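-- pv_equiv track=rewrite | github.com/Jbarfield101/Blossom_Music-gen | core/stems.py | _fold_pitch_to_register
-- ===== SOURCE A (Python) =====
-- def _fold_pitch_to_register(pitch: int, low: int, high: int) -> int:
--     """Fold ``pitch`` into the inclusive ``[low, high]`` MIDI register.
--
--     The function shifts ``pitch`` by octaves until it falls within the range
--     and clamps the result as a last resort.  This mirrors the clamping strategy
--     used in other modules but is kept local to avoid a heavier dependency.
--     """
--
--     while pitch < low:
--         pitch += 12
--     while pitch > high:
--         pitch -= 12
--     if pitch < low:
--         pitch = low
--     if pitch > high:
--         pitch = high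
--     return pitch
-- ===== SOURCE B (Python) =====
-- def _fold_pitch_to_register(pitch: int, low: int, high: int) -> int:
--     """Closed-form octave fold into [low, high] with final clamps."""
--     p = pitch + 12 * ((low - pitch + 11) // 12) if pitch < low else pitch
--     p = p - 12 * ((p - high + 11) // 12) if p > high else p
--     if p < low:
--         p = low
--     if p > high:
--         p = high
--     return p
-- ===== Notes on version B (the rewrite author's own statement) =====
-- stated objective: faster
-- what changed: Replaces both octave-shifting while-loops with closed-form ceiling-division octave arithmetic, keeping the final clamps.
import Mathlib
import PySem

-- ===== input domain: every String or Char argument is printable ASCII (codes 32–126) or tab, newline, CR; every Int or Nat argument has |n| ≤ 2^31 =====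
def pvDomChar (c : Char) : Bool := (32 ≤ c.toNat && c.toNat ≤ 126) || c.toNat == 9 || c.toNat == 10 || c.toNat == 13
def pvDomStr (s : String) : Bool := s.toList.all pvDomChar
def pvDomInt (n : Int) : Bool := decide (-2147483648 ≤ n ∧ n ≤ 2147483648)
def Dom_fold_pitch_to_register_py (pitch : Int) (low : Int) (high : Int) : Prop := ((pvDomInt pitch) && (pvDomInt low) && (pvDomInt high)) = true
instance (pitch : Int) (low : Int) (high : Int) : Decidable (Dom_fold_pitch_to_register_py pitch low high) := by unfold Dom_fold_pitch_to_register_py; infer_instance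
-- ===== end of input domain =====

-- B replaces A's two octave-shifting while-loops (O(distance/12) iterations) with closed-form floor-division octave arithmetic, keeping the final clamps.


-- ===== PORT A =====
-- `while pitch < low: pitch += 12`
def pvRaiseLoop (pitch low : Int) : Int :=
  if pitch < low then pvRaiseLoop (pitch + 12) low else pitch
termination_by (low - pitch).toNat
decreasing_by omega

-- `while pitch > high: pitch -= 12`
def pvLowerLoop (pitch high : Int) : Int :=
  if pitch > high then pvLowerLoop (pitch - 12) high else pitch
termination_by (pitch - high).toNat
decreasing_by omega

def fold_pitch_to_register_py (pitch : Int) (low : Int) (high : Int) : Int :=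
  let p1 := pvRaiseLoop pitch low
  let p2 := pvLowerLoop p1 high
  let p3 := if p2 < low then low else p2
  if p3 > high then high else p3

-- ===== PORT B =====
def fold_pitch_to_register_py_alt (pitch : Int) (low : Int) (high : Int) : Int :=
  let p1 := if pitch < low then pitch + 12 * PySem.Int.floordiv (low - pitch + 11) 12 else pitch
  let p2 := if p1 > high then p1 - 12 * PySem.Int.floordiv (p1 - high + 11) 12 else p1
  let p3 := if p2 < low then low else p2
  if p3 > high then high else p3

-- ===== PRECONDITION & SPEC =====
def Spec_fold_pitch_to_register_py (pitch : Int) (low : Int) (high : Int) (out : Int) : Prop := out = fold_pitch_to_register_py_alt pitch low high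
instance (pitch : Int) (low : Int) (high : Int) (out : Int) : Decidable (Spec_fold_pitch_to_register_py pitch low high out) := by unfold Spec_fold_pitch_to_register_py; infer_instance

-- ===== CLAIM (what is proved, stated in full; the proofs are below) =====
def Claim_equal_fold_pitch_to_register_py : Prop := ∀ (pitch : Int) (low : Int) (high : Int), Dom_fold_pitch_to_register_py pitch low high → Spec_fold_pitch_to_register_py pitch low high (fold_pitch_to_register_py pitch low high)

-- ===== LEMMAS AND PROOFS =====
lemma pvRaiseLoop_closed (pitch low : Int) :
    pvRaiseLoop pitch low =
      if pitch < low then pitch + 12 * ((low - pitch + 11) / 12) else pitch := by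
  fun_induction pvRaiseLoop pitch low with
  | case1 p h ih =>
    rw [ih]; split_ifs <;> omega
  | case2 p h =>
    rw [if_neg h]

lemma pvLowerLoop_closed (pitch high : Int) :
    pvLowerLoop pitch high =
      if pitch > high then pitch - 12 * ((pitch - high + 11) / 12) else pitch := by
  fun_induction pvLowerLoop pitch high with
  | case1 p h ih =>
    rw [ih]; split_ifs <;> omega
  | case2 p h =>
    rw [if_neg h]

-- ===== VERDICT (by name: the statement is the Claim_ definition above) =====
theorem fold_pitch_to_register_py_spec : Claim_equal_fold_pitch_to_register_py := by
  intro pitch low high _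
  unfold Spec_fold_pitch_to_register_py fold_pitch_to_register_py fold_pitch_to_register_py_alt
  simp only [pvRaiseLoop_closed, pvLowerLoop_closed,
    PySem.Int.floordiv_eq_ediv_of_pos (a := low - pitch + 11) (by norm_num : (0:Int) < 12),
    PySem.Int.floordiv_eq_ediv_of_pos (by norm_num : (0:Int) < 12)]
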